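-- pv_equiv track=rewrite | github.com/Sebo-the-tramp/tiny_vqa_creation | answering_questions/utils/saving_utils.py | _determine_tsv_fieldnames
-- ===== SOURCE A (Python) =====
-- def _determine_tsv_fieldnames(question_records, answer_records):
--     preferred_order = [
--         "index",
--         "image",
--         "image_path",
--         "question",
--         "hint",
--         "multi-choice options",
--         "options",
--         "answer",
--         "category",
--         "l2-category",
--         "split",
--     ]
--
--     question_keys = set()
--     for record in question_records:
--         question_keys.update(record.keys())
--
--     answer_keys = set()
--     for answer in answer_records:
--         if isinstance(answer, dict):
--             answer_keys.update(answer.keys())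
--         elif answer is not None:
--             answer_keys.add("answer")
--
--     question_keys.discard("index")
--     answer_keys.discard("index")
--
--     ordered = []
--     for field in preferred_order:
--         if field == "index" or field in question_keys or field in answer_keys:
--             if field != "index":
--                 question_keys.discard(field)
--                 answer_keys.discard(field)
--             ordered.append(field)
--
--     remaining = sorted(question_keys.union(answer_keys))
--     for field in remaining:
--         if field not in ordered:
--             ordered.append(field)
--
--     return ordered
-- ===== SOURCE B (Python) =====
-- def _determine_tsv_fieldnames(question_records, answer_records):
--     preferred_order = [
--         "index",
--         "image",
--         "image_path",
--         "question",
--         "hint",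
--         "multi-choice options",
--         "options",
--         "answer",
--         "category",
--         "l2-category",
--         "split",
--     ]
--
--     all_keys = set()
--     for record in question_records:
--         all_keys.update(record.keys())
--     for answer in answer_records:
--         if isinstance(answer, dict):
--             all_keys.update(answer.keys())
--         elif answer is not None:
--             all_keys.add("answer")
--     all_keys.add("index")
--
--     prio = {name: i for i, name in enumerate(preferred_order)}
--     fallback = len(preferred_order)
--     return sorted(all_keys, key=lambda k: (prio.get(k, fallback), k))
-- ===== Notes on version B (the rewrite author's own statement) =====
-- stated objective: faster
-- what changed: Replaces A's two stateful phases (preferred-order loop with in-place set discards, then an append loop that re-scans the growing ordered list with 'field not in ordered' for every remaining key) by collecting all keys into one set plus 'index' and producing the result with a single sorted() call whose key is (priority-map rank, name).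
import Mathlib
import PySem

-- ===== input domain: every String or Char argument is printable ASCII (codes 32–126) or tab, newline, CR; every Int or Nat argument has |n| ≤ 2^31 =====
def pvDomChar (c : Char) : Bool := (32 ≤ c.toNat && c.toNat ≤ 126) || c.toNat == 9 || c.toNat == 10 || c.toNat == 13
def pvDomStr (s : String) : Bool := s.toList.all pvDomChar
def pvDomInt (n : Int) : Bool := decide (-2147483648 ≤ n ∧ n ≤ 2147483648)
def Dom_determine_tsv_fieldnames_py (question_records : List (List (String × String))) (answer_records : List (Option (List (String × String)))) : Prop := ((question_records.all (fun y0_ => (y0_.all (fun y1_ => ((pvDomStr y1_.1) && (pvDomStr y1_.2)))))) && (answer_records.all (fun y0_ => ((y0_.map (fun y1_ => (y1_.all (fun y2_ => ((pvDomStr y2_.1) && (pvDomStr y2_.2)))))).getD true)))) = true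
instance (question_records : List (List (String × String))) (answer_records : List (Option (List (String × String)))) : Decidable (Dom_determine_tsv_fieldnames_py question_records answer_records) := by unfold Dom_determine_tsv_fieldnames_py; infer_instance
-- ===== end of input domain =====

-- B replaces A's two stateful ordering phases by one sorted() call with a (priority, name)
-- key over the collected key set — objective: faster (measured; A re-scans its growing
-- ordered list per remaining key).  (Under the Lean type convention an
-- answer item is `some dict` or `none`, so Python's non-dict/non-None 'answer' branch is
-- unreachable in the ports; both Pythons agree on it anyway.)

-- ===== PORT A =====
def pvPreferred : List String :=
  ["index", "image", "image_path", "question", "hint", "multi-choice options",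
   "options", "answer", "category", "l2-category", "split"]

-- the body of A's `for field in preferred_order` loop (state: question_keys, answer_keys, ordered)
def pvStepA (st : PySem.Set String × PySem.Set String × List String) (field : String) :
    PySem.Set String × PySem.Set String × List String :=
  let qk := st.1
  let ak := st.2.1
  let ordered := st.2.2
  if field = "index" ∨ PySem.Set.contains qk field = true ∨ PySem.Set.contains ak field = true then
    (if field ≠ "index" then PySem.Set.discard qk field else qk,
     if field ≠ "index" then PySem.Set.discard ak field else ak,
     ordered ++ [field])
  else
    (qk, ak, ordered)

def determine_tsv_fieldnames_py (question_records : List (List (String × String))) (answer_records : List (Option (List (String × String)))) : List String :=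
  let question_keys : PySem.Set String :=
    question_records.foldl (fun s record => PySem.Set.update s (PySem.Dict.mk record).keys) PySem.Set.empty
  let answer_keys : PySem.Set String :=
    answer_records.foldl (fun s answer =>
      match answer with
      | some d => PySem.Set.update s (PySem.Dict.mk d).keys
      | none => s) PySem.Set.empty
  let question_keys := PySem.Set.discard question_keys "index"
  let answer_keys := PySem.Set.discard answer_keys "index"
  let st := pvPreferred.foldl pvStepA (question_keys, answer_keys, [])
  let remaining := PySem.List.sorted (PySem.Set.union st.1 st.2.1) (fun x => x)
  remaining.foldl (fun ordered field => if field ∈ ordered then ordered else ordered ++ [field]) st.2.2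

-- ===== PORT B =====
-- prio = {name: i for i, name in enumerate(preferred_order)}
def pvPrio : PySem.Dict String Int :=
  (PySem.List.enumerate pvPreferred).foldl (fun d p => d.insert p.2 (p.1 : Int)) PySem.Dict.empty

-- Python's tuple key (prio.get(k, fallback), k) compares lexicographically: exact as `toLex`
def pvKeyB (k : String) : Lex (Int × String) :=
  toLex (pvPrio.getD k (pvPreferred.length : Int), k)

def determine_tsv_fieldnames_py_alt (question_records : List (List (String × String))) (answer_records : List (Option (List (String × String)))) : List String :=
  let all0 : PySem.Set String :=
    question_records.foldl (fun s record => PySem.Set.update s (PySem.Dict.mk record).keys) PySem.Set.empty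
  let all1 : PySem.Set String :=
    answer_records.foldl (fun s answer =>
      match answer with
      | some d => PySem.Set.update s (PySem.Dict.mk d).keys
      | none => s) all0
  let allKeys := PySem.Set.add all1 "index"
  PySem.List.sorted allKeys pvKeyB

-- ===== PRECONDITION & SPEC =====
def Spec_determine_tsv_fieldnames_py (question_records : List (List (String × String))) (answer_records : List (Option (List (String × String)))) (out : List String) : Prop := out = determine_tsv_fieldnames_py_alt question_records answer_records
instance (question_records : List (List (String × String))) (answer_records : List (Option (List (String × String)))) (out : List String) : Decidable (Spec_determine_tsv_fieldnames_py question_records answer_records out) := by unfold Spec_determine_tsv_fieldnames_py; infer_instance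

-- ===== CLAIM (what is proved, stated in full; the proofs are below) =====
def Claim_equal_determine_tsv_fieldnames_py : Prop := ∀ (question_records : List (List (String × String))) (answer_records : List (Option (List (String × String)))), Dom_determine_tsv_fieldnames_py question_records answer_records → Spec_determine_tsv_fieldnames_py question_records answer_records (determine_tsv_fieldnames_py question_records answer_records)

-- ===== LEMMAS AND PROOFS =====
-- ===== LEMMAS AND PROOFS =====

theorem pv_mem_qfold (l : List (List (String × String))) (s : PySem.Set String) (x : String) :
    x ∈ l.foldl (fun s record => PySem.Set.update s (PySem.Dict.mk record).keys) s ↔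
      x ∈ s ∨ ∃ r ∈ l, x ∈ (PySem.Dict.mk r).keys := by
  induction l generalizing s with
  | nil => simp
  | cons r t ih =>
    simp only [List.foldl_cons, ih, PySem.Set.mem_update, List.mem_cons]
    constructor
    · rintro (⟨h | h⟩ | ⟨r', hr', hx⟩)
      · exact Or.inl h
      · exact Or.inr ⟨r, Or.inl rfl, h⟩
      · exact Or.inr ⟨r', Or.inr hr', hx⟩
    · rintro (h | ⟨r', (rfl | hr'), hx⟩)
      · exact Or.inl (Or.inl h)
      · exact Or.inl (Or.inr hx)
      · exact Or.inr ⟨r', hr', hx⟩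

theorem pv_nodup_qfold (l : List (List (String × String))) (s : PySem.Set String) (hs : s.Nodup) :
    (l.foldl (fun s record => PySem.Set.update s (PySem.Dict.mk record).keys) s).Nodup := by
  induction l generalizing s with
  | nil => exact hs
  | cons r t ih => exact ih _ (PySem.Set.nodup_update _ _ hs)

theorem pv_mem_afold (l : List (Option (List (String × String)))) (s : PySem.Set String) (x : String) :
    x ∈ l.foldl (fun s answer =>
        match answer with
        | some d => PySem.Set.update s (PySem.Dict.mk d).keys
        | none => s) s ↔
      x ∈ s ∨ ∃ d, some d ∈ l ∧ x ∈ (PySem.Dict.mk d).keys := by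
  induction l generalizing s with
  | nil => simp
  | cons a t ih =>
    cases a with
    | none =>
      simp only [List.foldl_cons, ih, List.mem_cons]
      constructor
      · rintro (h | ⟨d, hd, hx⟩)
        · exact Or.inl h
        · exact Or.inr ⟨d, Or.inr hd, hx⟩
      · rintro (h | ⟨d, (hd | hd), hx⟩)
        · exact Or.inl h
        · exact absurd hd (by simp)
        · exact Or.inr ⟨d, hd, hx⟩
    | some d0 =>
      simp only [List.foldl_cons, ih, PySem.Set.mem_update, List.mem_cons]
      constructor
      · rintro (⟨h | h⟩ | ⟨d, hd, hx⟩)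
        · exact Or.inl h
        · exact Or.inr ⟨d0, Or.inl rfl, h⟩
        · exact Or.inr ⟨d, Or.inr hd, hx⟩
      · rintro (h | ⟨d, (hd | hd), hx⟩)
        · exact Or.inl (Or.inl h)
        · exact Or.inl (Or.inr (by cases Option.some.inj hd; exact hx))
        · exact Or.inr ⟨d, hd, hx⟩

theorem pv_nodup_afold (l : List (Option (List (String × String)))) (s : PySem.Set String) (hs : s.Nodup) :
    (l.foldl (fun s answer =>
        match answer with
        | some d => PySem.Set.update s (PySem.Dict.mk d).keys
        | none => s) s).Nodup := by
  induction l generalizing s with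
  | nil => exact hs
  | cons a t ih =>
    cases a with
    | none => exact ih _ hs
    | some d => exact ih _ (PySem.Set.nodup_update _ _ hs)

def pvCondA (qk ak : PySem.Set String) (f : String) : Bool :=
  decide (f = "index" ∨ PySem.Set.contains qk f = true ∨ PySem.Set.contains ak f = true)

theorem pv_stepA_loop (fields : List String) (qk ak : PySem.Set String) (ord : List String)
    (hnd : fields.Nodup) (hiq : "index" ∉ qk) (hia : "index" ∉ ak)
    (hq : qk.Nodup) (ha : ak.Nodup) :
    (∀ x, x ∈ (fields.foldl pvStepA (qk, ak, ord)).1 ↔ x ∈ qk ∧ x ∉ fields) ∧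
    (∀ x, x ∈ (fields.foldl pvStepA (qk, ak, ord)).2.1 ↔ x ∈ ak ∧ x ∉ fields) ∧
    (fields.foldl pvStepA (qk, ak, ord)).1.Nodup ∧
    (fields.foldl pvStepA (qk, ak, ord)).2.1.Nodup ∧
    (fields.foldl pvStepA (qk, ak, ord)).2.2 = ord ++ fields.filter (pvCondA qk ak) := by
  induction fields generalizing qk ak ord with
  | nil => exact ⟨fun x => by simp, fun x => by simp, hq, ha, by simp⟩
  | cons f t ih =>
    obtain ⟨hft, hndt⟩ := List.nodup_cons.mp hnd
    by_cases hc : f = "index" ∨ PySem.Set.contains qk f = true ∨ PySem.Set.contains ak f = true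
    · by_cases hfi : f = "index"
      · subst hfi
        have hstep : pvStepA (qk, ak, ord) "index" = (qk, ak, ord ++ ["index"]) := by
          simp [pvStepA]
        obtain ⟨h1, h2, h3, h4, h5⟩ := ih qk ak (ord ++ ["index"]) hndt hiq hia hq ha
        rw [List.foldl_cons, hstep]
        refine ⟨fun x => ?_, fun x => ?_, h3, h4, ?_⟩
        · rw [h1 x]
          constructor
          · rintro ⟨hx, hxt⟩
            exact ⟨hx, by simp only [List.mem_cons]; rintro (rfl | h); exact hiq hx; exact hxt h⟩
          · rintro ⟨hx, hxt⟩; exact ⟨hx, fun h => hxt (List.mem_cons_of_mem _ h)⟩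
        · rw [h2 x]
          constructor
          · rintro ⟨hx, hxt⟩
            exact ⟨hx, by simp only [List.mem_cons]; rintro (rfl | h); exact hia hx; exact hxt h⟩
          · rintro ⟨hx, hxt⟩; exact ⟨hx, fun h => hxt (List.mem_cons_of_mem _ h)⟩
        · rw [h5]
          have : pvCondA qk ak "index" = true := decide_eq_true (Or.inl rfl)
          simp [this]
      · have hstep : pvStepA (qk, ak, ord) f =
            (PySem.Set.discard qk f, PySem.Set.discard ak f, ord ++ [f]) := by
          simp only [pvStepA]; rw [if_pos hc]; simp [hfi]
        have hiq' : "index" ∉ PySem.Set.discard qk f := by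
          simp only [PySem.Set.mem_discard]; rintro ⟨h, _⟩; exact hiq h
        have hia' : "index" ∉ PySem.Set.discard ak f := by
          simp only [PySem.Set.mem_discard]; rintro ⟨h, _⟩; exact hia h
        obtain ⟨h1, h2, h3, h4, h5⟩ := ih (PySem.Set.discard qk f) (PySem.Set.discard ak f)
          (ord ++ [f]) hndt hiq' hia' (PySem.Set.nodup_discard _ _ hq) (PySem.Set.nodup_discard _ _ ha)
        rw [List.foldl_cons, hstep]
        refine ⟨fun x => ?_, fun x => ?_, h3, h4, ?_⟩
        · rw [h1 x, PySem.Set.mem_discard]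
          simp only [List.mem_cons]; constructor
          · rintro ⟨⟨hx, hne⟩, hxt⟩
            exact ⟨hx, by rintro (rfl | h); exact hne rfl; exact hxt h⟩
          · rintro ⟨hx, hxt⟩
            exact ⟨⟨hx, fun h => hxt (Or.inl h)⟩, fun h => hxt (Or.inr h)⟩
        · rw [h2 x, PySem.Set.mem_discard]
          simp only [List.mem_cons]; constructor
          · rintro ⟨⟨hx, hne⟩, hxt⟩
            exact ⟨hx, by rintro (rfl | h); exact hne rfl; exact hxt h⟩
          · rintro ⟨hx, hxt⟩
            exact ⟨⟨hx, fun h => hxt (Or.inl h)⟩, fun h => hxt (Or.inr h)⟩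
        · rw [h5]
          have hcf : pvCondA qk ak f = true := decide_eq_true hc
          have hcongr : ∀ f' ∈ t, pvCondA (PySem.Set.discard qk f) (PySem.Set.discard ak f) f'
              = pvCondA qk ak f' := by
            intro f' hf'
            have hne : f' ≠ f := fun h => hft (h ▸ hf')
            have e1 : (PySem.Set.contains (PySem.Set.discard qk f) f' = true)
                ↔ (PySem.Set.contains qk f' = true) := by
              simp [PySem.Set.mem_discard, hne]
            have e2 : (PySem.Set.contains (PySem.Set.discard ak f) f' = true)
                ↔ (PySem.Set.contains ak f' = true) := by
              simp [PySem.Set.mem_discard, hne]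
            exact decide_eq_decide.mpr (by rw [e1, e2])
          rw [List.filter_congr hcongr, List.filter_cons, hcf]
          simp
    · have hstep : pvStepA (qk, ak, ord) f = (qk, ak, ord) := by
        simp only [pvStepA]; rw [if_neg hc]
      have hfq : f ∉ qk := fun h => hc (Or.inr (Or.inl ((PySem.Set.contains_iff _ _).mpr h)))
      have hfa : f ∉ ak := fun h => hc (Or.inr (Or.inr ((PySem.Set.contains_iff _ _).mpr h)))
      obtain ⟨h1, h2, h3, h4, h5⟩ := ih qk ak ord hndt hiq hia hq ha
      rw [List.foldl_cons, hstep]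
      refine ⟨fun x => ?_, fun x => ?_, h3, h4, ?_⟩
      · rw [h1 x]
        simp only [List.mem_cons]; constructor
        · rintro ⟨hx, hxt⟩
          exact ⟨hx, by rintro (rfl | h); exact hfq hx; exact hxt h⟩
        · rintro ⟨hx, hxt⟩; exact ⟨hx, fun h => hxt (Or.inr h)⟩
      · rw [h2 x]
        simp only [List.mem_cons]; constructor
        · rintro ⟨hx, hxt⟩
          exact ⟨hx, by rintro (rfl | h); exact hfa hx; exact hxt h⟩
        · rintro ⟨hx, hxt⟩; exact ⟨hx, fun h => hxt (Or.inr h)⟩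
      · rw [h5]
        have : pvCondA qk ak f = false := by simp only [pvCondA, decide_eq_false_iff_not]; exact hc
        simp [this]

theorem pv_append_loop (rem : List String) (ord : List String)
    (h : ∀ f ∈ rem, f ∉ ord) (hnd : rem.Nodup) :
    rem.foldl (fun ordered field => if field ∈ ordered then ordered else ordered ++ [field]) ord
      = ord ++ rem := by
  induction rem generalizing ord with
  | nil => simp
  | cons f t ih =>
    obtain ⟨hft, hndt⟩ := List.nodup_cons.mp hnd
    have hf : f ∉ ord := h f (List.mem_cons_self ..)
    rw [List.foldl_cons, if_neg hf, ih (ord ++ [f]) ?_ hndt]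
    · simp
    · intro f' hf'
      simp only [List.mem_append, List.mem_singleton]
      rintro (h' | rfl)
      · exact h f' (List.mem_cons_of_mem _ hf') h'
      · exact hft hf'

theorem pv_pref_nodup : pvPreferred.Nodup := by decide

theorem pv_index_mem_pref : "index" ∈ pvPreferred := by decide

theorem pv_prio_pairwise :
    pvPreferred.Pairwise (fun a b =>
      pvPrio.getD a (pvPreferred.length : Int) < pvPrio.getD b (pvPreferred.length : Int)) := by
  decide

theorem pv_prio_lt_of_mem (f : String) (hf : f ∈ pvPreferred) :
    pvPrio.getD f (pvPreferred.length : Int) < (pvPreferred.length : Int) := by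
  revert hf; revert f; decide

theorem pv_prio_of_not_mem (x : String) (hx : x ∉ pvPreferred) :
    pvPrio.getD x (pvPreferred.length : Int) = (pvPreferred.length : Int) := by
  apply PySem.Dict.getD_of_not_contains
  have hkeys : pvPrio.keys = pvPreferred := by decide
  rw [Bool.eq_false_iff]
  intro hc
  exact hx (hkeys ▸ (PySem.Dict.contains_iff_mem_keys pvPrio x).mp hc)

set_option maxHeartbeats 1000000 in
theorem pv_main (question_records : List (List (String × String)))
    (answer_records : List (Option (List (String × String)))) :
    determine_tsv_fieldnames_py question_records answer_records
      = determine_tsv_fieldnames_py_alt question_records answer_records := by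
  simp only [determine_tsv_fieldnames_py, determine_tsv_fieldnames_py_alt]
  set QK := question_records.foldl
      (fun s record => PySem.Set.update s (PySem.Dict.mk record).keys) PySem.Set.empty with hQKdef
  set AK := answer_records.foldl
      (fun s answer =>
        match answer with
        | some d => PySem.Set.update s (PySem.Dict.mk d).keys
        | none => s) PySem.Set.empty with hAKdef
  set AL := answer_records.foldl
      (fun s answer =>
        match answer with
        | some d => PySem.Set.update s (PySem.Dict.mk d).keys
        | none => s) QK with hALdef
  -- membership characterizations of the collected key sets
  have hmemQK : ∀ x, x ∈ QK ↔ ∃ r ∈ question_records, x ∈ (PySem.Dict.mk r).keys := by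
    intro x; rw [hQKdef, pv_mem_qfold]; simp [PySem.Set.empty]
  have hmemAK : ∀ x, x ∈ AK ↔ ∃ d, some d ∈ answer_records ∧ x ∈ (PySem.Dict.mk d).keys := by
    intro x; rw [hAKdef, pv_mem_afold]; simp [PySem.Set.empty]
  have hmemAL : ∀ x, x ∈ AL ↔ x ∈ QK ∨ x ∈ AK := by
    intro x; rw [hALdef, pv_mem_afold, hmemAK]
  have hndQK : QK.Nodup := pv_nodup_qfold _ _ (by simp [PySem.Set.empty])
  have hndAK : AK.Nodup := pv_nodup_afold _ _ (by simp [PySem.Set.empty])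
  have hndAL : AL.Nodup := pv_nodup_afold _ _ hndQK
  -- the discarded sets fed into A's preferred-order loop
  set QK' := PySem.Set.discard QK "index" with hQK'def
  set AK' := PySem.Set.discard AK "index" with hAK'def
  have hiq : "index" ∉ QK' := by rw [hQK'def]; simp [PySem.Set.mem_discard]
  have hia : "index" ∉ AK' := by rw [hAK'def]; simp [PySem.Set.mem_discard]
  obtain ⟨h1, h2, h3, h4, h5⟩ := pv_stepA_loop pvPreferred QK' AK' [] pv_pref_nodup hiq hia
    (PySem.Set.nodup_discard _ _ hndQK) (PySem.Set.nodup_discard _ _ hndAK)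
  set r := pvPreferred.foldl pvStepA (QK', AK', []) with hrdef
  set remaining := PySem.List.sorted (PySem.Set.union r.1 r.2.1) (fun x => x) with hremdef
  -- membership in A's "remaining"
  have hkmem : ∀ x, (x ∈ QK ∨ x ∈ AK) ↔ x ∈ AL := fun x => (hmemAL x).symm
  have hremmem : ∀ x, x ∈ remaining ↔ (x ∈ AL ∧ x ≠ "index") ∧ x ∉ pvPreferred := by
    intro x
    rw [hremdef]
    rw [PySem.List.mem_sorted]
    rw [PySem.Set.mem_union]
    rw [h1, h2]
    rw [hQK'def, hAK'def, PySem.Set.mem_discard, PySem.Set.mem_discard]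
    rw [← hkmem x]
    constructor
    · rintro (⟨⟨h, hn⟩, hp⟩ | ⟨⟨h, hn⟩, hp⟩)
      · exact ⟨⟨Or.inl h, hn⟩, hp⟩
      · exact ⟨⟨Or.inr h, hn⟩, hp⟩
    · rintro ⟨⟨h | h, hn⟩, hp⟩
      · exact Or.inl ⟨⟨h, hn⟩, hp⟩
      · exact Or.inr ⟨⟨h, hn⟩, hp⟩
  have hremnodup : remaining.Nodup := by
    rw [hremdef]
    exact ((PySem.List.sorted_perm _ _ _).symm).nodup (PySem.Set.nodup_union _ _ h3)
  -- A's second loop appends all of remaining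
  have hfiltmem : ∀ x, x ∈ r.2.2 ↔ x ∈ pvPreferred ∧ pvCondA QK' AK' x = true := by
    intro x; rw [h5]; simp [List.mem_filter]
  have happend : remaining.foldl
      (fun ordered field => if field ∈ ordered then ordered else ordered ++ [field]) r.2.2
      = r.2.2 ++ remaining := by
    apply pv_append_loop _ _ _ hremnodup
    intro f hf hford
    exact ((hremmem f).mp hf).2 ((hfiltmem f).mp hford).1
  rw [happend, h5, List.nil_append]
  -- characterize the condition of A's preferred-order loop
  have hco : ∀ x, pvCondA QK' AK' x = true ↔ (x = "index" ∨ (x ∈ AL ∧ x ≠ "index")) := by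
    intro x
    rw [pvCondA, decide_eq_true_eq]
    rw [PySem.Set.contains_iff, PySem.Set.contains_iff]
    rw [hQK'def, hAK'def, PySem.Set.mem_discard, PySem.Set.mem_discard]
    rw [← hkmem x]
    constructor
    · rintro (h | ⟨h, hn⟩ | ⟨h, hn⟩)
      · exact Or.inl h
      · exact Or.inr ⟨Or.inl h, hn⟩
      · exact Or.inr ⟨Or.inr h, hn⟩
    · rintro (h | ⟨h | h, hn⟩)
      · exact Or.inl h
      · exact Or.inr (Or.inl ⟨h, hn⟩)
      · exact Or.inr (Or.inr ⟨h, hn⟩)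
  -- B's sorted() call returns exactly A's list
  set allKeys := PySem.Set.add AL "index" with halldef
  have hallmem : ∀ x, x ∈ allKeys ↔ x ∈ AL ∨ x = "index" := by
    intro x; rw [halldef, PySem.Set.mem_add]
  have hallnodup : allKeys.Nodup := PySem.Set.nodup_add _ _ hndAL
  have hfnodup : (pvPreferred.filter (pvCondA QK' AK')).Nodup := pv_pref_nodup.filter _
  have hdisj : ∀ x ∈ pvPreferred.filter (pvCondA QK' AK'), x ∉ remaining := by
    intro x hx hxr
    exact ((hremmem x).mp hxr).2 (List.mem_filter.mp hx).1
  have hlhsnodup : (pvPreferred.filter (pvCondA QK' AK') ++ remaining).Nodup := by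
    rw [List.nodup_append]
    exact ⟨hfnodup, hremnodup, fun a ha b hb h => hdisj a ha (h ▸ hb)⟩
  have hperm : (pvPreferred.filter (pvCondA QK' AK') ++ remaining).Perm allKeys := by
    rw [List.perm_ext_iff_of_nodup hlhsnodup hallnodup]
    intro x
    rw [List.mem_append, List.mem_filter, hco x, hremmem x, hallmem x]
    constructor
    · rintro (⟨hp, (rfl | ⟨hal, hn⟩)⟩ | ⟨⟨hal, hn⟩, hp⟩)
      · exact Or.inr rfl
      · exact Or.inl hal
      · exact Or.inl hal
    · rintro (hal | rfl)
      · by_cases hxi : x = "index"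
        · exact Or.inl ⟨hxi ▸ pv_index_mem_pref, Or.inl hxi⟩
        · by_cases hxp : x ∈ pvPreferred
          · exact Or.inl ⟨hxp, Or.inr ⟨hal, hxi⟩⟩
          · exact Or.inr ⟨⟨hal, hxi⟩, hxp⟩
      · exact Or.inl ⟨pv_index_mem_pref, Or.inl rfl⟩
  have hpw : (pvPreferred.filter (pvCondA QK' AK') ++ remaining).Pairwise
      (fun a b => pvKeyB a < pvKeyB b) := by
    rw [List.pairwise_append]
    refine ⟨?_, ?_, ?_⟩
    · refine (pv_prio_pairwise.filter _).imp ?_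
      intro a b hab
      exact Prod.Lex.toLex_lt_toLex.mpr (Or.inl hab)
    · have hle : remaining.Pairwise (fun a b : String => a ≤ b) :=
        PySem.List.sorted_pairwise _ _
      have hne : remaining.Pairwise (fun a b : String => a ≠ b) := hremnodup
      refine (hle.and hne).imp_of_mem ?_
      intro a b ha hb hab
      have hap : a ∉ pvPreferred := ((hremmem a).mp ha).2
      have hbp : b ∉ pvPreferred := ((hremmem b).mp hb).2
      refine Prod.Lex.toLex_lt_toLex.mpr (Or.inr ⟨?_, lt_of_le_of_ne hab.1 hab.2⟩)
      rw [pv_prio_of_not_mem a hap, pv_prio_of_not_mem b hbp]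
    · intro a ha b hb
      have hap : a ∈ pvPreferred := (List.mem_filter.mp ha).1
      have hbp : b ∉ pvPreferred := ((hremmem b).mp hb).2
      refine Prod.Lex.toLex_lt_toLex.mpr (Or.inl ?_)
      rw [pv_prio_of_not_mem b hbp]
      exact pv_prio_lt_of_mem a hap
  exact (PySem.List.sorted_eq_of_perm_of_pairwise_lt allKeys _ pvKeyB hperm hpw).symm

-- ===== VERDICT (by name: the statement is the Claim_ definition above) =====
theorem determine_tsv_fieldnames_py_spec : Claim_equal_determine_tsv_fieldnames_py := by
  intro question_records answer_records _
  exact pv_main question_records answer_records
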